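-- pv_equiv track=rewrite | github.com/daniel-reich/ubiquitous-fiesta | HSKvp4qYA2AhDWxn6_10.py | total_points
-- ===== SOURCE A (Python) =====
-- def total_points(guesses, word):
--     points = 0
--     for words in guesses:
--         if len(words) == len(word):
--             if sorted(words) == sorted(word):
--                 points += 54
--         else:
--             if sorted(words) == sorted([i for i in words if i in word and word.count(i) >= words.count(i)]) and len(words) == 3:
--                 points += 1
--             if sorted(words) == sorted([i for i in words if i in word and word.count(i) >= words.count(i)]) and len(words) == 4:
--                 points += 2
--             if sorted(words) == sorted([i for i in words if i in word and word.count(i) >= words.count(i)]) and len(words) == 5: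
--                 points += 3
--     return points
-- ===== SOURCE B (Python) =====
-- def _counts(s):
--     c = {}
--     for ch in s:
--         c[ch] = c.get(ch, 0) + 1
--     return c
--
-- def total_points(guesses, word):
--     wc = _counts(word)
--     total = 0
--     for g in guesses:
--         cg = _counts(g)
--         if len(g) == len(word):
--             if cg == wc:
--                 total += 54
--         else:
--             if all(wc.get(c, 0) >= n for c, n in cg.items()):
--                 total += {3: 1, 4: 2, 5: 3}.get(len(g), 0)
--     return total
-- ===== Notes on version B (the rewrite author's own statement) =====
-- stated objective: faster
-- what changed: Replaces per-guess sorting plus the triply-recomputed count-filter comprehension with one frequency table built once for the word and one per guess: dict equality decides the anagram case and a count-containment all() over the guess counter plus a length->points dict lookup decides the subset case.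
import Mathlib
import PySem

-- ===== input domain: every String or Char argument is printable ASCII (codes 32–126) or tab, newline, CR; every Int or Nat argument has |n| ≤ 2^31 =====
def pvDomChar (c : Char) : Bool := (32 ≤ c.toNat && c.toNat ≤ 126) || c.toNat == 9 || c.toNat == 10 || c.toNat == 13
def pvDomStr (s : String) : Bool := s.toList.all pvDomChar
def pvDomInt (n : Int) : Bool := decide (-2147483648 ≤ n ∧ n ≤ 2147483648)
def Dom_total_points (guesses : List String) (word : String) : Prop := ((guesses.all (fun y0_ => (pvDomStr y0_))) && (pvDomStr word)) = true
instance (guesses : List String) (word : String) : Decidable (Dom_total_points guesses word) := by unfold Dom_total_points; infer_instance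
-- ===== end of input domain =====

-- B replaces A's per-guess sorting and triply-recomputed count-filter comprehension by one
-- frequency table per string: simpler single-pass counting logic, same return value.

-- ===== PORT A =====
-- 'i in word' / 'word.count(i)' on the single-character string i are exactly Char membership /
-- Char count on the list of characters, ported as List.contains / List.count.
def total_points (guesses : List String) (word : String) : Int :=
  guesses.foldl (fun points words =>
    let w := words.toList
    let wd := word.toList
    if w.length == wd.length then
      if PySem.List.sorted w (fun x => x) false == PySem.List.sorted wd (fun x => x) false then
        points + 54
      else points
    else
      let points :=
        if (PySem.List.sorted w (fun x => x) false ==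
              PySem.List.sorted (w.filter (fun i => wd.contains i && decide (w.count i ≤ wd.count i))) (fun x => x) false)
            && w.length == 3 then points + 1 else points
      let points :=
        if (PySem.List.sorted w (fun x => x) false ==
              PySem.List.sorted (w.filter (fun i => wd.contains i && decide (w.count i ≤ wd.count i))) (fun x => x) false)
            && w.length == 4 then points + 2 else points
      let points :=
        if (PySem.List.sorted w (fun x => x) false ==
              PySem.List.sorted (w.filter (fun i => wd.contains i && decide (w.count i ≤ wd.count i))) (fun x => x) false)
            && w.length == 5 then points + 3 else points
      points) 0

-- ===== PORT B =====
-- Source B's hand-rolled counting loop 'c[ch] = c.get(ch, 0) + 1', step for step.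
def pvCounts (s : List Char) : PySem.Dict Char Int :=
  s.foldl (fun c ch => c.insert ch (c.getD ch 0 + 1)) PySem.Dict.empty

-- Python's 'gc == wc' on dicts (order-ignoring): same key set, same value at every key.
-- (getD with default 0 reads the stored value whenever the key is present, so it is get? here.)
def pvDictEq (d1 d2 : PySem.Dict Char Int) : Bool :=
  PySem.Set.equal d1.keys d2.keys && d1.keys.all (fun k => d1.getD k 0 == d2.getD k 0)

def total_points_alt (guesses : List String) (word : String) : Int :=
  let wc := pvCounts word.toList
  guesses.foldl (fun total g =>
    let gc := pvCounts g.toList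
    if g.toList.length == word.toList.length then
      if pvDictEq gc wc then total + 54 else total
    else
      if gc.items.all (fun kv => decide (kv.2 ≤ wc.getD kv.1 0)) then
        total + PySem.Dict.getD (PySem.Dict.ofList [((3 : Int), (1 : Int)), (4, 2), (5, 3)]) (g.toList.length : Int) 0
      else total) 0

-- ===== PRECONDITION & SPEC =====
def Spec_total_points (guesses : List String) (word : String) (out : Int) : Prop := out = total_points_alt guesses word
instance (guesses : List String) (word : String) (out : Int) : Decidable (Spec_total_points guesses word out) := by unfold Spec_total_points; infer_instance

-- ===== CLAIM (what is proved, stated in full; the proofs are below) =====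
def Claim_equal_total_points : Prop := ∀ (guesses : List String) (word : String), Dom_total_points guesses word → Spec_total_points guesses word (total_points guesses word)

-- ===== LEMMAS AND PROOFS =====

-- counts built by Source B's loop ARE Counter(s)
theorem pvCounts_eq_counter (s : List Char) : pvCounts s = PySem.Dict.counter s := by
  simpa [pvCounts] using PySem.Dict.foldl_insert_getD_add_one_eq_counter (xs := s)

-- dict equality of the two counters decides the anagram (permutation) relation
theorem pvDictEq_counter_iff (w wd : List Char) :
    pvDictEq (pvCounts w) (pvCounts wd) = true ↔ w.Perm wd := by
  rw [pvCounts_eq_counter, pvCounts_eq_counter]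
  constructor
  · intro h
    simp only [pvDictEq, Bool.and_eq_true, PySem.Set.equal_iff, PySem.Dict.keys_counter,
      List.all_eq_true, PySem.Dict.getD_counter, PySem.Set.mem_ofList, beq_iff_eq] at h
    obtain ⟨hmem, hcnt⟩ := h
    rw [List.perm_iff_count]
    intro c
    by_cases hc : c ∈ w
    · exact_mod_cast hcnt c hc
    · have hcwd : c ∉ wd := fun hwd => hc ((hmem c).mpr hwd)
      simp [List.count_eq_zero_of_not_mem, hc, hcwd]
  · intro h
    simp only [pvDictEq, Bool.and_eq_true, PySem.Set.equal_iff, PySem.Dict.keys_counter,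
      List.all_eq_true, PySem.Dict.getD_counter, PySem.Set.mem_ofList, beq_iff_eq]
    constructor
    · intro x; exact ⟨fun hx => h.mem_iff.mp hx, fun hx => h.mem_iff.mpr hx⟩
    · intro c _; exact_mod_cast (List.perm_iff_count.mp h) c

-- A's sorted-equals-sorted-filter test holds iff every character passes the filter
theorem sorted_filter_iff (w : List Char) (p : Char → Bool) :
    (PySem.List.sorted w (fun x => x) false =
      PySem.List.sorted (w.filter p) (fun x => x) false) ↔ ∀ i ∈ w, p i = true := by
  constructor
  · intro h
    have hperm : (w.filter p).Perm w :=
      ((PySem.List.sorted_id_eq_sorted_id_iff_perm (w.filter p) w).mp h.symm)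
    have hlen : (w.filter p).length = w.length := hperm.length_eq
    have : w.filter p = w := List.filter_sublist.eq_of_length hlen
    exact fun i hi => List.filter_eq_self.mp this i hi
  · intro h
    rw [List.filter_eq_self.mpr h]

-- A's per-character predicate is exactly count containment
theorem pred_iff (w wd : List Char) (i : Char) (hi : i ∈ w) :
    (wd.contains i && decide (w.count i ≤ wd.count i)) = true ↔ w.count i ≤ wd.count i := by
  constructor
  · intro h; simp only [Bool.and_eq_true, decide_eq_true_eq] at h; exact h.2
  · intro h
    have h1 : 0 < w.count i := List.count_pos_iff.mpr hi
    have : i ∈ wd := List.count_pos_iff.mp (lt_of_lt_of_le h1 h)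
    simp [this, h]

-- B's items-based containment test
theorem items_all_iff (w wd : List Char) :
    ((pvCounts w).items.all (fun kv => decide (kv.2 ≤ (pvCounts wd).getD kv.1 0)) = true) ↔
      ∀ i ∈ w, w.count i ≤ wd.count i := by
  rw [pvCounts_eq_counter, pvCounts_eq_counter]
  simp only [PySem.Dict.items_counter, List.all_map, List.all_eq_true, Function.comp,
    PySem.Dict.getD_counter, PySem.Set.mem_ofList, decide_eq_true_eq]
  constructor
  · intro h i hi; exact_mod_cast h i hi
  · intro h i hi; exact_mod_cast h i hi

-- the length→points lookup
theorem points_lookup (n : Nat) (h3 : n ≠ 3) (h4 : n ≠ 4) (h5 : n ≠ 5) :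
    PySem.Dict.getD (PySem.Dict.ofList [((3 : Int), (1 : Int)), (4, 2), (5, 3)]) (n : Int) 0 = 0 := by
  have e3 : ((3 : Int) == (n : Int)) = false := by
    simp only [beq_eq_false_iff_ne, ne_eq]; intro h; exact h3 (by exact_mod_cast h.symm)
  have e4 : ((4 : Int) == (n : Int)) = false := by
    simp only [beq_eq_false_iff_ne, ne_eq]; intro h; exact h4 (by exact_mod_cast h.symm)
  have e5 : ((5 : Int) == (n : Int)) = false := by
    simp only [beq_eq_false_iff_ne, ne_eq]; intro h; exact h5 (by exact_mod_cast h.symm)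
  simp [PySem.Dict.ofList, PySem.Dict.getD, PySem.Dict.get?, PySem.Dict.update,
    PySem.Dict.insert, PySem.Dict.empty, e3, e4, e5]

-- the two loop bodies agree on every guess
theorem step_eq (word : String) (points : Int) (words : String) :
    (let w := words.toList
     let wd := word.toList
     if w.length == wd.length then
       if PySem.List.sorted w (fun x => x) false == PySem.List.sorted wd (fun x => x) false then
         points + 54
       else points
     else
       let points :=
         if (PySem.List.sorted w (fun x => x) false ==
               PySem.List.sorted (w.filter (fun i => wd.contains i && decide (w.count i ≤ wd.count i))) (fun x => x) false)
             && w.length == 3 then points + 1 else points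
       let points :=
         if (PySem.List.sorted w (fun x => x) false ==
               PySem.List.sorted (w.filter (fun i => wd.contains i && decide (w.count i ≤ wd.count i))) (fun x => x) false)
             && w.length == 4 then points + 2 else points
       let points :=
         if (PySem.List.sorted w (fun x => x) false ==
               PySem.List.sorted (w.filter (fun i => wd.contains i && decide (w.count i ≤ wd.count i))) (fun x => x) false)
             && w.length == 5 then points + 3 else points
       points) =
    (let gc := pvCounts words.toList
     if words.toList.length == word.toList.length then
       if pvDictEq gc (pvCounts word.toList) then points + 54 else points
     else
       if gc.items.all (fun kv => decide (kv.2 ≤ (pvCounts word.toList).getD kv.1 0)) then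
         points + PySem.Dict.getD (PySem.Dict.ofList [((3 : Int), (1 : Int)), (4, 2), (5, 3)]) (words.toList.length : Int) 0
       else points) := by
  set w := words.toList with hw
  set wd := word.toList with hwd
  simp only []
  by_cases hlen : (w.length == wd.length) = true
  · simp only [hlen, if_true]
    have : (PySem.List.sorted w (fun x => x) false == PySem.List.sorted wd (fun x => x) false) =
        pvDictEq (pvCounts w) (pvCounts wd) := by
      by_cases hp : w.Perm wd
      · have h1 : (PySem.List.sorted w (fun x => x) false == PySem.List.sorted wd (fun x => x) false) = true := by
          simp [PySem.List.sorted_id_eq_sorted_id_iff_perm, hp]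
        rw [h1, ((pvDictEq_counter_iff w wd).mpr hp)]
      · have h1 : (PySem.List.sorted w (fun x => x) false == PySem.List.sorted wd (fun x => x) false) = false := by
          simp [PySem.List.sorted_id_eq_sorted_id_iff_perm, hp]
        have h2 : pvDictEq (pvCounts w) (pvCounts wd) = false := by
          rcases Bool.eq_false_or_eq_true (pvDictEq (pvCounts w) (pvCounts wd)) with h | h
          · exact absurd ((pvDictEq_counter_iff w wd).mp h) hp
          · exact h
        rw [h1, h2]
    rw [this]
  · simp only [hlen, if_false, Bool.false_eq_true]
    by_cases hsub : ∀ i ∈ w, w.count i ≤ wd.count i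
    · have hfilt : (PySem.List.sorted w (fun x => x) false ==
          PySem.List.sorted (w.filter (fun i => wd.contains i && decide (w.count i ≤ wd.count i))) (fun x => x) false) = true := by
        simp only [beq_iff_eq]
        exact (sorted_filter_iff w _).mpr (fun i hi => (pred_iff w wd i hi).mpr (hsub i hi))
      have hall : (pvCounts w).items.all (fun kv => decide (kv.2 ≤ (pvCounts wd).getD kv.1 0)) = true :=
        (items_all_iff w wd).mpr hsub
      rw [hfilt, hall]
      by_cases h3 : w.length = 3
      · simp [h3]; decide
      · by_cases h4 : w.length = 4
        · simp [h4]; decide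
        · by_cases h5 : w.length = 5
          · simp [h5]; decide
          · simp [h3, h4, h5, points_lookup w.length h3 h4 h5]
    · have hfilt : (PySem.List.sorted w (fun x => x) false ==
          PySem.List.sorted (w.filter (fun i => wd.contains i && decide (w.count i ≤ wd.count i))) (fun x => x) false) = false := by
        simp only [beq_eq_false_iff_ne, ne_eq, sorted_filter_iff]
        intro hcon
        exact hsub (fun i hi => (pred_iff w wd i hi).mp (hcon i hi))
      have hall : (pvCounts w).items.all (fun kv => decide (kv.2 ≤ (pvCounts wd).getD kv.1 0)) = false := by
        rcases Bool.eq_false_or_eq_true ((pvCounts w).items.all (fun kv => decide (kv.2 ≤ (pvCounts wd).getD kv.1 0))) with h | h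
        · exact absurd ((items_all_iff w wd).mp h) hsub
        · exact h
      rw [hfilt, hall]
      simp

-- ===== VERDICT (by name: the statement is the Claim_ definition above) =====
theorem total_points_spec : Claim_equal_total_points := by
  intro guesses word _
  unfold Spec_total_points total_points total_points_alt
  exact PySem.List.foldl_congr_mem _ _ _ _ (fun acc g _ => step_eq word acc g)
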